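-- pv_equiv track=rewrite | github.com/crossplatformdev/ElijaxApps_Watchy | tools/fetch_watchfaces_from_sqfmi.py | apply_version_preference
-- ===== SOURCE A (Python) =====
-- from typing import Dict, Iterable, List, Optional, Tuple
--
-- def apply_version_preference(entries: List[Tuple[str, str]]) -> List[Tuple[str, str]]:
--     # If both "X" and "X 2.0" exist, keep only "X 2.0" but map it to name "X".
--     normalized: Dict[str, Tuple[str, str]] = {}
--     raw: Dict[str, Tuple[str, str]] = {}
--
--     def base_name(n: str) -> Tuple[str, bool]:
--         n = n.strip()
--         if n.endswith("2.0") or n.endswith("2.0 "):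
--             return n.replace("2.0", "").strip(), True
--         if n.lower().endswith(" 2.0"):
--             return n[:-4].strip(), True
--         return n, False
--
--     # First pass: remember originals
--     for n, u in entries:
--         raw[n] = (n, u)
--
--     # Second pass: prefer 2.0
--     for n, u in entries:
--         b, is20 = base_name(n)
--         if b not in normalized:
--             normalized[b] = (n, u)
--         else:
--             prev_name, prev_url = normalized[b]
--             prev_is20 = base_name(prev_name)[1]
--             if is20 and not prev_is20:
--                 normalized[b] = (n, u)
--
--     # Emit in original order of base names as they first appeared
--     emitted: List[Tuple[str, str]] = []
--     seen_base = set()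
--     for n, _ in entries:
--         b, _ = base_name(n)
--         if b in seen_base:
--             continue
--         seen_base.add(b)
--         chosen_name, chosen_url = normalized[b]
--         # Map directory name to base name if 2.0 chosen
--         _, chosen_is20 = base_name(chosen_name)
--         final_name = b if chosen_is20 else chosen_name
--         emitted.append((final_name, chosen_url))
--
--     return emitted
-- ===== SOURCE B (Python) =====
-- from typing import List, Tuple
--
-- def apply_version_preference(entries: List[Tuple[str, str]]) -> List[Tuple[str, str]]:
--     # Dict-free formulation: emit one pair per first occurrence of a base name,
--     # choosing the url of the first "2.0" variant found by a whole-list scan,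
--     # else the first entry itself.
--     def base_name(n: str) -> Tuple[str, bool]:
--         n = n.strip()
--         if n.endswith("2.0") or n.endswith("2.0 "):
--             return n.replace("2.0", "").strip(), True
--         if n.lower().endswith(" 2.0"):
--             return n[:-4].strip(), True
--         return n, False
--
--     def pick(b: str, n: str, u: str) -> Tuple[str, str]:
--         # first "2.0" variant of base b anywhere in entries, else this entry
--         for m, uu in entries:
--             bm, is20 = base_name(m)
--             if bm == b and is20:
--                 return (b, uu)
--         return (n, u)
--
--     out: List[Tuple[str, str]] = []
--     prefix: List[Tuple[str, str]] = []
--     for n, u in entries: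
--         b = base_name(n)[0]
--         if all(base_name(m)[0] != b for m, _ in prefix):
--             out.append(pick(b, n, u))
--         prefix.append((n, u))
--     return out
-- ===== Notes on version B (the rewrite author's own statement) =====
-- stated objective: alternative
-- what changed: Replaces A's dict-based three passes (raw dict, prefer-2.0 dict accumulation, emit pass with a seen-set) by a dict-free formulation: at each first occurrence of a base name (detected by scanning the already-processed prefix) it emits directly, scanning the whole list once for the first '2.0' variant of that base, else keeping the entry itself.
import Mathlib
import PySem

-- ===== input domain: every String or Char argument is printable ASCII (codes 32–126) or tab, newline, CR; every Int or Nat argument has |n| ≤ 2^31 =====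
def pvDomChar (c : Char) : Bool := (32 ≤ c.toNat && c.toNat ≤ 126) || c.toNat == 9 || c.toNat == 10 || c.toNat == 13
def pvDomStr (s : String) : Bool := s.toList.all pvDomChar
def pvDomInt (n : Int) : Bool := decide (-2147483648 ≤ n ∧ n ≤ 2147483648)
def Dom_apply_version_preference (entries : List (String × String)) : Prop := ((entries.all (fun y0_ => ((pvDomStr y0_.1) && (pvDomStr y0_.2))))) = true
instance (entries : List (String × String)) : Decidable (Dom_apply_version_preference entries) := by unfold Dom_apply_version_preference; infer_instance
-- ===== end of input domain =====

-- B replaces A's dict-based three passes by a dict-free formulation: emit at each first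
-- occurrence of a base name, scanning the prefix for duplicates and the whole list for the
-- first "2.0" variant; same return value, objective: alternative (no speed claim).

-- shared helper: the nested Python base_name (identical in A and B)
def base_name (n0 : String) : String × Bool :=
  let n := PySem.Str.strip n0
  if PySem.Str.endswith n "2.0" || PySem.Str.endswith n "2.0 " then
    (PySem.Str.strip (PySem.Str.replace n "2.0" ""), true)
  else if PySem.Str.endswith (PySem.Str.lower n) " 2.0" then
    (PySem.Str.strip (PySem.Str.slice n none (some (-4))), true)
  else (n, false)

-- ===== PORT A =====
def apply_version_preference (entries : List (String × String)) : List (String × String) :=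
  -- first pass: raw (built and, as in the Python, never read afterwards)
  let _raw : PySem.Dict String (String × String) :=
    entries.foldl (fun d p => d.insert p.1 (p.1, p.2)) PySem.Dict.empty
  -- second pass: prefer 2.0
  let normalized : PySem.Dict String (String × String) :=
    entries.foldl (fun d p =>
      let bi := base_name p.1
      if d.contains bi.1 = false then d.insert bi.1 (p.1, p.2)
      else
        let prev := d.getD bi.1 ("", "")
        if bi.2 && !(base_name prev.1).2 then d.insert bi.1 (p.1, p.2) else d)
      PySem.Dict.empty
  -- third pass: emit in first-appearance order of base names
  (entries.foldl (fun (st : List (String × String) × PySem.Set String) p =>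
      let b := (base_name p.1).1
      if PySem.Set.contains st.2 b then st
      else
        let chosen := normalized.getD b ("", "")
        let final_name := if (base_name chosen.1).2 then b else chosen.1
        (st.1 ++ [(final_name, chosen.2)], PySem.Set.add st.2 b))
    ([], PySem.Set.empty)).1

-- ===== PORT B =====
-- the nested Python pick: first "2.0" variant of base b anywhere in entries, else (n, u)
def pick (entries : List (String × String)) (b n u : String) : String × String :=
  match entries.find? (fun q => (base_name q.1).1 == b && (base_name q.1).2) with
  | some q => (b, q.2)
  | none => (n, u)

def apply_version_preference_alt (entries : List (String × String)) : List (String × String) :=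
  (entries.foldl (fun (st : List (String × String) × List (String × String)) p =>
      let b := (base_name p.1).1
      ((if st.2.all (fun q => !((base_name q.1).1 == b)) then
          st.1 ++ [pick entries b p.1 p.2]
        else st.1), st.2 ++ [p]))
    ([], [])).1

-- ===== PRECONDITION & SPEC =====
def Spec_apply_version_preference (entries : List (String × String)) (out : List (String × String)) : Prop := out = apply_version_preference_alt entries
instance (entries : List (String × String)) (out : List (String × String)) : Decidable (Spec_apply_version_preference entries out) := by unfold Spec_apply_version_preference; infer_instance

-- ===== CLAIM (what is proved, stated in full; the proofs are below) =====
def Claim_equal_apply_version_preference : Prop := ∀ (entries : List (String × String)), Dom_apply_version_preference entries → Spec_apply_version_preference entries (apply_version_preference entries)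

-- ===== LEMMAS AND PROOFS =====

-- the base of an entry
def pvBaseOf (p : String × String) : String := (base_name p.1).1

-- first entry with base b, and first "2.0" entry with base b
def pvFirst (entries : List (String × String)) (b : String) : Option (String × String) :=
  entries.find? (fun q => (base_name q.1).1 == b)
def pvFirst20 (entries : List (String × String)) (b : String) : Option (String × String) :=
  entries.find? (fun q => (base_name q.1).1 == b && (base_name q.1).2)
-- the entry A's second pass ends up storing under key b
def pvSpec (entries : List (String × String)) (b : String) : Option (String × String) :=
  (pvFirst20 entries b).or (pvFirst entries b)
-- the pair both programs emit for base b
def pvEmit (entries : List (String × String)) (b : String) : String × String :=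
  match pvSpec entries b with
  | some v => ((if (base_name v.1).2 then b else v.1), v.2)
  | none => ("", "")

-- A's second-pass step, named for the induction
def pvStepA (d : PySem.Dict String (String × String)) (p : String × String) :
    PySem.Dict String (String × String) :=
  let bi := base_name p.1
  if d.contains bi.1 = false then d.insert bi.1 (p.1, p.2)
  else
    let prev := d.getD bi.1 ("", "")
    if bi.2 && !(base_name prev.1).2 then d.insert bi.1 (p.1, p.2) else d

-- pvSpec over a one-element extension
theorem pvFirst_append (pre : List (String × String)) (p : String × String) (b : String) :
    pvFirst (pre ++ [p]) b = (pvFirst pre b).or (pvFirst [p] b) := by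
  simp [pvFirst, List.find?_append]

theorem pvFirst20_append (pre : List (String × String)) (p : String × String) (b : String) :
    pvFirst20 (pre ++ [p]) b = (pvFirst20 pre b).or (pvFirst20 [p] b) := by
  simp [pvFirst20, List.find?_append]

-- if no entry of l has base b, neither find? fires
theorem pvFirst_eq_none (l : List (String × String)) (b : String)
    (h : ∀ q ∈ l, (base_name q.1).1 ≠ b) : pvFirst l b = none := by
  apply List.find?_eq_none.mpr
  intro q hq
  simp [h q hq]

theorem pvFirst20_eq_none_of_first (l : List (String × String)) (b : String)
    (h : pvFirst l b = none) : pvFirst20 l b = none := by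
  apply List.find?_eq_none.mpr
  intro q hq
  have := List.find?_eq_none.mp h q hq
  simp at this
  simp [this]

-- the stored flag equals "a 2.0 variant has been seen"
theorem pvSpec_flag (l : List (String × String)) (b : String) (v : String × String)
    (h : pvSpec l b = some v) :
    (base_name v.1).1 = b ∧ ((base_name v.1).2 = (pvFirst20 l b).isSome) := by
  unfold pvSpec at h
  cases h20 : pvFirst20 l b with
  | some q =>
    rw [h20] at h
    simp [Option.or] at h
    subst h
    have := List.find?_some h20
    simp at this
    simp [this.1, this.2]
  | none =>
    rw [h20] at h
    simp [Option.or] at h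
    have hb := List.find?_some h
    simp at hb
    refine ⟨hb, ?_⟩
    have hv : v ∈ l := List.mem_of_find?_eq_some h
    have hnone := List.find?_eq_none.mp h20 v hv
    simp [hb] at hnone
    simp [hnone]

-- A's second pass computes pvSpec of the processed prefix
theorem pvA_get (xs : List (String × String)) :
    ∀ (pre : List (String × String)) (d : PySem.Dict String (String × String)),
      (∀ b, d.get? b = pvSpec pre b) →
      ∀ b, (xs.foldl pvStepA d).get? b = pvSpec (pre ++ xs) b := by
  induction xs with
  | nil => intro pre d hd b; simpa using hd b
  | cons p rest ih =>
    intro pre d hd b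
    have hstep : ∀ b, (pvStepA d p).get? b = pvSpec (pre ++ [p]) b := by
      intro b
      by_cases hb : (base_name p.1).1 = b
      · -- the processed entry has base b
        subst hb
        have hone : pvFirst [p] (base_name p.1).1 = some p :=
          List.find?_cons_of_pos (by simp)
        by_cases hc : d.contains (base_name p.1).1 = false
        · -- fresh key: both sides become p
          have hnone : pvSpec pre (base_name p.1).1 = none := by
            rw [← hd]
            rw [PySem.Dict.contains_eq_isSome_get?] at hc
            cases h : d.get? (base_name p.1).1
            · rfl
            · rw [h] at hc; simp at hc
          have h1 : pvFirst pre (base_name p.1).1 = none := by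
            unfold pvSpec at hnone
            cases h20 : pvFirst20 pre (base_name p.1).1 with
            | none => rw [h20] at hnone; simpa [Option.or] using hnone
            | some q => rw [h20] at hnone; simp [Option.or] at hnone
          have h2 : pvFirst20 pre (base_name p.1).1 = none :=
            pvFirst20_eq_none_of_first pre _ h1
          simp only [pvStepA, hc, if_true]
          rw [PySem.Dict.get?_insert_self]
          unfold pvSpec
          rw [pvFirst20_append, pvFirst_append, h1, h2, hone]
          cases h20p : pvFirst20 [p] (base_name p.1).1 with
          | some q =>
            have := List.find?_some h20p
            have hq : q = p := by
              have hm := List.mem_of_find?_eq_some h20p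
              simpa using hm
            subst hq
            simp [Option.or]
          | none => simp [Option.or]
        · -- key present: v stored, maybe replaced
          have hc' : d.contains (base_name p.1).1 = true := by simpa using hc
          obtain ⟨v, hv⟩ : ∃ v, d.get? (base_name p.1).1 = some v := by
            rw [PySem.Dict.contains_eq_isSome_get?] at hc'
            cases h : d.get? (base_name p.1).1
            · rw [h] at hc'; simp at hc'
            · exact ⟨_, rfl⟩
          have hspec : pvSpec pre (base_name p.1).1 = some v := by rw [← hd, hv]
          obtain ⟨hvb, hvflag⟩ := pvSpec_flag pre _ v hspec
          have hgd : d.getD (base_name p.1).1 ("", "") = v := PySem.Dict.getD_of_get?_eq_some _ _ hv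
          simp only [pvStepA, hc', Bool.true_eq_false, if_false, hgd]
          by_cases hrep : ((base_name p.1).2 && !(base_name v.1).2) = true
          · -- replace: p is 2.0, no 2.0 seen yet
            obtain ⟨h20p, hnot⟩ : (base_name p.1).2 = true ∧ (!(base_name v.1).2) = true := by
              simpa using hrep
            have hvf : (base_name v.1).2 = false := by simpa using hnot
            have h20pre : pvFirst20 pre (base_name p.1).1 = none := by
              rw [hvf] at hvflag
              cases h : pvFirst20 pre (base_name p.1).1
              · rfl
              · rw [h] at hvflag; simp at hvflag
            simp only [hrep, if_true]
            rw [PySem.Dict.get?_insert_self]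
            unfold pvSpec
            rw [pvFirst20_append, h20pre]
            have h20one : pvFirst20 [p] (base_name p.1).1 = some p :=
              List.find?_cons_of_pos (by simp [h20p])
            rw [h20one]
            simp [Option.or]
          · -- keep v
            rw [if_neg hrep]
            unfold pvSpec
            rw [pvFirst20_append, pvFirst_append, hone]
            cases h20pre : pvFirst20 pre (base_name p.1).1 with
            | some q =>
              have : pvSpec pre (base_name p.1).1 = some q := by
                unfold pvSpec; rw [h20pre]; simp [Option.or]
              rw [this] at hspec
              simp only [Option.or]
              rw [hv]
              exact hspec.symm
            | none =>
              -- then v's flag is false, so p is not 2.0 either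
              have hvf : (base_name v.1).2 = false := by simp [hvflag, h20pre]
              have hp20 : (base_name p.1).2 = false := by
                cases h : (base_name p.1).2
                · rfl
                · exfalso; apply hrep; simp [h, hvf]
              have h20one : pvFirst20 [p] (base_name p.1).1 = none := by
                unfold pvFirst20
                rw [List.find?_cons_of_neg (by simp [hp20])]
                rfl
              rw [h20one]
              have hfpre : pvFirst pre (base_name p.1).1 = some v := by
                unfold pvSpec at hspec
                rw [h20pre] at hspec
                simpa [Option.or] using hspec
              rw [hfpre]
              simp only [Option.or]
              exact hv
      · -- other keys untouched
        have hne : ¬ ((base_name p.1).1 == b) = true := by simpa using hb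
        have huntouched : (pvStepA d p).get? b = d.get? b := by
          simp only [pvStepA]
          split
          · exact PySem.Dict.get?_insert_of_ne _ _ (fun h => hb h.symm)
          · split
            · exact PySem.Dict.get?_insert_of_ne _ _ (fun h => hb h.symm)
            · rfl
        rw [huntouched, hd]
        unfold pvSpec
        rw [pvFirst20_append, pvFirst_append]
        have h1 : pvFirst [p] b = none := by
          unfold pvFirst
          rw [List.find?_cons_of_neg (by simpa using hb)]
          rfl
        have h2 : pvFirst20 [p] b = none := by
          unfold pvFirst20
          rw [List.find?_cons_of_neg (by simp [hb])]
          rfl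
        rw [h1, h2]
        cases pvFirst20 pre b <;> cases pvFirst pre b <;> simp [Option.or]
    have := ih (pre ++ [p]) (pvStepA d p) hstep b
    simpa using this

-- first-appearance bases of a base list, relative to an already-seen set
def pvNewBases (bs : List String) (seen : PySem.Set String) : List String :=
  match bs with
  | [] => []
  | b :: rest =>
    if PySem.Set.contains seen b then pvNewBases rest seen
    else b :: pvNewBases rest (PySem.Set.add seen b)

theorem mem_pvNewBases (bs : List String) (seen : PySem.Set String) (b : String)
    (h : b ∈ pvNewBases bs seen) : b ∈ bs := by
  induction bs generalizing seen with
  | nil => simp [pvNewBases] at h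
  | cons x rest ih =>
    simp only [pvNewBases] at h
    by_cases hc : PySem.Set.contains seen x = true
    · rw [if_pos hc] at h
      exact List.mem_cons_of_mem _ (ih _ h)
    · rw [if_neg hc] at h
      rcases List.mem_cons.mp h with h | h
      · simp [h]
      · exact List.mem_cons_of_mem _ (ih _ h)

-- A's third pass emits g over the first-appearance base list
theorem pv_pass3 (g : String → String × String) (bs : List String)
    (acc : List (String × String)) (s : PySem.Set String) :
    (bs.foldl (fun st b =>
        if PySem.Set.contains st.2 b then st
        else (st.1 ++ [g b], PySem.Set.add st.2 b)) (acc, s)).1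
      = acc ++ (pvNewBases bs s).map g := by
  induction bs generalizing acc s with
  | nil => simp [pvNewBases]
  | cons b rest ih =>
    simp only [List.foldl_cons, pvNewBases]
    by_cases hc : PySem.Set.contains s b = true
    · simp only [hc, if_true]
      rw [ih]
    · simp only [hc, Bool.false_eq_true, if_false]
      rw [ih]
      simp

-- Bool-level contains facts for PySem.Set
theorem pvContains_decide (t : PySem.Set String) (x : String) :
    t.contains x = decide (x ∈ t) := by
  cases h : t.contains x
  · symm; simp; intro hm
    have := (PySem.Set.contains_iff t x).mpr hm
    rw [h] at this; cases this
  · simp [(PySem.Set.contains_iff t x).mp h]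

theorem pvContains_add (s : PySem.Set String) (y x : String) :
    (PySem.Set.add s y).contains x = decide (x ∈ s ∨ x = y) := by
  rw [pvContains_decide, decide_eq_decide]
  exact PySem.Set.mem_add s y x

theorem pvMemS (S : PySem.Set String) (pre : List (String × String))
    (hS : ∀ x, S.contains x = decide (x ∈ pre.map pvBaseOf)) (x : String) :
    x ∈ S ↔ x ∈ pre.map pvBaseOf :=
  decide_eq_decide.mp ((pvContains_decide S x).symm.trans (hS x))

-- B's loop emits pvEmit over the same first-appearance base list
theorem pvB_go (entries : List (String × String)) :
    ∀ (xs pre : List (String × String)) (out : List (String × String)) (S : PySem.Set String),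
      entries = pre ++ xs →
      (∀ x, PySem.Set.contains S x = decide (x ∈ pre.map pvBaseOf)) →
      (xs.foldl (fun (st : List (String × String) × List (String × String)) p =>
          let b := (base_name p.1).1
          ((if st.2.all (fun q => !((base_name q.1).1 == b)) then
              st.1 ++ [pick entries b p.1 p.2]
            else st.1), st.2 ++ [p])) (out, pre)).1
        = out ++ (pvNewBases (xs.map pvBaseOf) S).map (pvEmit entries) := by
  intro xs
  induction xs with
  | nil => intro pre out S _ _; simp [pvNewBases]
  | cons p rest ih =>
    intro pre out S hsplit hS
    simp only [List.foldl_cons, List.map_cons, pvNewBases]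
    have htest : (pre.all (fun q => !((base_name q.1).1 == (base_name p.1).1)))
        = !decide ((base_name p.1).1 ∈ pre.map pvBaseOf) := by
      by_cases hmem : (base_name p.1).1 ∈ pre.map pvBaseOf
      · simp only [hmem, decide_true, Bool.not_true]
        obtain ⟨q, hq, hqb⟩ := List.mem_map.mp hmem
        apply List.all_eq_false.mpr
        exact ⟨q, hq, by simp [pvBaseOf] at hqb; simp [hqb]⟩
      · simp only [hmem, decide_false, Bool.not_false]
        apply List.all_eq_true.mpr
        intro q hq
        have : pvBaseOf q ≠ (base_name p.1).1 := fun h => hmem (List.mem_map.mpr ⟨q, hq, h⟩)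
        simp [pvBaseOf] at this
        simp [this]
    by_cases hmem : (base_name p.1).1 ∈ pre.map pvBaseOf
    · -- base already seen: both sides skip
      have hSc : PySem.Set.contains S (base_name p.1).1 = true := by
        rw [hS]; simp [hmem]
      rw [htest]
      simp only [pvBaseOf, hmem, decide_true, Bool.not_true, Bool.false_eq_true, if_false, hSc, if_true]
      apply ih (pre ++ [p]) out S (by simpa using hsplit)
      intro x
      rw [hS]
      simp only [List.map_append, List.map_cons, List.map_nil]
      by_cases hx : x ∈ pre.map pvBaseOf
      · simp [hx]
      · simp only [hx, decide_false]
        have : x ≠ pvBaseOf p := by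
          intro h; subst h; exact hx (by simpa [pvBaseOf] using hmem)
        simp [hx, this]
    · -- first occurrence: emit, and the emitted pair is pvEmit
      have hSc : PySem.Set.contains S (base_name p.1).1 = false := by
        rw [hS]; simp [hmem]
      rw [htest]
      simp only [pvBaseOf, hmem, decide_false, Bool.not_false, if_true, hSc, Bool.false_eq_true, if_false]
      have hnopre : ∀ q ∈ pre, (base_name q.1).1 ≠ (base_name p.1).1 := by
        intro q hq h
        exact hmem (List.mem_map.mpr ⟨q, hq, h⟩)
      have hfpre : pvFirst pre (base_name p.1).1 = none := pvFirst_eq_none pre _ hnopre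
      have hf20pre : pvFirst20 pre (base_name p.1).1 = none :=
        pvFirst20_eq_none_of_first pre _ hfpre
      have hemit : pick entries (base_name p.1).1 p.1 p.2 = pvEmit entries (base_name p.1).1 := by
        have hfe : pvFirst entries (base_name p.1).1 = some p := by
          rw [hsplit]
          unfold pvFirst
          rw [List.find?_append]
          unfold pvFirst at hfpre
          rw [hfpre]
          rw [List.find?_cons_of_pos (by simp)]
          rfl
        have hf20e : pvFirst20 entries (base_name p.1).1
            = pvFirst20 (p :: rest) (base_name p.1).1 := by
          rw [hsplit]
          unfold pvFirst20
          rw [List.find?_append]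
          unfold pvFirst20 at hf20pre
          rw [hf20pre]
          simp [Option.or]
        unfold pick pvEmit pvSpec
        rw [show entries.find? (fun q => (base_name q.1).1 == (base_name p.1).1 && (base_name q.1).2)
              = pvFirst20 entries (base_name p.1).1 from rfl]
        rw [hf20e]
        cases h20 : pvFirst20 (p :: rest) (base_name p.1).1 with
        | some q =>
          have := List.find?_some h20
          simp at this
          simp [Option.or, this.2]
        | none =>
          rw [hfe]
          have hp20 : (base_name p.1).2 = false := by
            have := List.find?_eq_none.mp h20 p (by simp)
            simpa using this
          simp [Option.or, hp20]
      rw [hemit]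
      have := ih (pre ++ [p]) (out ++ [pvEmit entries (base_name p.1).1])
          (PySem.Set.add S (base_name p.1).1) (by simpa using hsplit) ?_
      · rw [this]; simp
      · intro x
        rw [pvContains_add, decide_eq_decide]
        simp only [List.map_append, List.map_cons, List.map_nil]
        rw [List.mem_append, pvMemS S pre hS x]
        simp [pvBaseOf, eq_comm]

-- the two programs agree
theorem pv_main (entries : List (String × String)) :
    apply_version_preference entries = apply_version_preference_alt entries := by
  unfold apply_version_preference apply_version_preference_alt
  set N := entries.foldl pvStepA PySem.Dict.empty with hN
  have hfold2 : entries.foldl (fun d p =>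
      let bi := base_name p.1
      if d.contains bi.1 = false then d.insert bi.1 (p.1, p.2)
      else
        let prev := d.getD bi.1 ("", "")
        if bi.2 && !(base_name prev.1).2 then d.insert bi.1 (p.1, p.2) else d)
      PySem.Dict.empty = N := rfl
  have hget : ∀ b, N.get? b = pvSpec entries b := by
    intro b
    have := pvA_get entries [] PySem.Dict.empty (fun b => by simp [pvSpec, pvFirst, pvFirst20, Option.or, PySem.Dict.get?_empty]) b
    simpa using this
  rw [hfold2]
  -- A's third pass as a map over the first-appearance bases
  set gA : String → String × String := fun b =>
    ((if (base_name (N.getD b ("", "")).1).2 then b else (N.getD b ("", "")).1),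
      (N.getD b ("", "")).2) with hgA
  have h3 : (entries.foldl (fun (st : List (String × String) × PySem.Set String) p =>
      let b := (base_name p.1).1
      if PySem.Set.contains st.2 b then st
      else
        let chosen := N.getD b ("", "")
        let final_name := if (base_name chosen.1).2 then b else chosen.1
        (st.1 ++ [(final_name, chosen.2)], PySem.Set.add st.2 b))
      ([], PySem.Set.empty)).1
      = (pvNewBases (entries.map pvBaseOf) PySem.Set.empty).map gA := by
    have := pv_pass3 gA (entries.map pvBaseOf) [] PySem.Set.empty
    rw [List.foldl_map] at this
    simpa [pvBaseOf] using this
  rw [h3]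
  -- B's loop as the same map
  have hB := pvB_go entries entries [] [] PySem.Set.empty rfl
      (fun x => by simp [PySem.Set.contains, PySem.Set.empty])
  rw [hB]
  simp only [List.nil_append]
  -- the two per-base functions agree on emitted bases
  apply List.map_congr_left
  intro b hb
  have hbs : b ∈ entries.map pvBaseOf := mem_pvNewBases _ _ _ hb
  obtain ⟨p, hp, hpb⟩ := List.mem_map.mp hbs
  have hfe : (pvFirst entries b).isSome := by
    unfold pvFirst
    rw [List.find?_isSome]
    exact ⟨p, hp, by simp [pvBaseOf] at hpb; simp [hpb]⟩
  obtain ⟨v, hv⟩ : ∃ v, pvSpec entries b = some v := by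
    unfold pvSpec
    cases h20 : pvFirst20 entries b with
    | none =>
      cases hf : pvFirst entries b with
      | none => rw [hf] at hfe; simp at hfe
      | some w => exact ⟨w, by simp [Option.or]⟩
    | some q => exact ⟨q, by simp [Option.or]⟩
  have hgd : N.getD b ("", "") = v := PySem.Dict.getD_of_get?_eq_some _ _ (by rw [hget, hv])
  rw [hgA]
  simp only [hgd]
  unfold pvEmit
  rw [hv]

-- ===== VERDICT (by name: the statement is the Claim_ definition above) =====
theorem apply_version_preference_spec : Claim_equal_apply_version_preference := by
  intro entries _
  unfold Spec_apply_version_preference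
  exact pv_main entries
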